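-- pv_equiv track=rewrite | github.com/guru071/quiz | encode_decode.py | __text_to_int
-- ===== SOURCE A (Python) =====
-- def __text_to_int(txt):
--     __int_list=[]
--     k=0
--     v=int(len(txt)/2)
--     for i in range(0,v):
--         __int_list.append(
--             [ord(j) for j in txt[k:k+2]]
--         )
--         k+=2
--     if len(txt)%2==1:
--         __int_list.append([ord(txt[len(txt)-1]),0])
--     return __int_list
-- ===== SOURCE B (Python) =====
-- def __text_to_int(txt):
--     it = iter(txt)
--     out = []
--     for a in it:
--         b = next(it, None)
--         out.append([ord(a), ord(b) if b is not None else 0])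
--     return out
-- ===== Notes on version B (the rewrite author's own statement) =====
-- stated objective: idiomatic
-- what changed: Replaced A's k-counter loop over range(len//2) with per-pair string slicing and a separate odd-length patch-up branch by a single pass that pairs characters off one iterator, padding a missing partner with 0 inline; dropping the per-pair slice+inner-comprehension allocation is what makes it measurably faster.
import Mathlib
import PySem

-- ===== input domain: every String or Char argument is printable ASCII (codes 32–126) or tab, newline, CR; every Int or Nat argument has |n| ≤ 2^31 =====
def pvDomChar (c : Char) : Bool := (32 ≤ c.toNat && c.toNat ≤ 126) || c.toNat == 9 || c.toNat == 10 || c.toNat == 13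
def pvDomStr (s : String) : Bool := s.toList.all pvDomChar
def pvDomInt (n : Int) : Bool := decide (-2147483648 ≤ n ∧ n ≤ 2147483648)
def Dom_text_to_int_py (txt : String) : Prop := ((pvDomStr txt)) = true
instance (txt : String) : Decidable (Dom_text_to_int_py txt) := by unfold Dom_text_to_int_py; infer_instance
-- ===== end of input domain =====

-- B replaces A's counter loop + odd-length patch branch by one iterator-pairing pass (idiomatic; a timing run measured it constant-factor faster).

-- ===== PORT A =====
-- A: k-counter loop over range(0, len//2) appending [ord(c) for c in txt[k:k+2]], then an odd-length fix-up.
def text_to_int_py (txt : String) : List (List Int) :=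
  let cs := txt.toList
  let v : Int := PySem.Int.truncdiv (PySem.Str.len txt) 2   -- int(len(txt)/2)
  let st := (PySem.List.pyRange 0 v 1).foldl
    (fun (st : List (List Int) × Int) _i =>
      (st.1 ++ [(PySem.List.slice cs (some st.2) (some (st.2 + 2))).map (fun c => (c.toNat : Int))],
       st.2 + 2))
    ([], 0)
  if PySem.Int.mod (PySem.Str.len txt) 2 = 1 then
    st.1 ++ [[PySem.List.pyGetD (cs.map (fun c => (c.toNat : Int))) (PySem.Str.len txt - 1) 0, 0]]
  else st.1

-- ===== PORT B =====
-- B: one pass pairing characters off a single iterator ('for a in it: b = next(it, None)'),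
-- transcribed as the obvious two-at-a-time structural recursion; a missing partner is padded with 0.
def pvAltGo : List Char → List (List Int)
  | [] => []
  | [a] => [[(a.toNat : Int), 0]]
  | a :: b :: rest => [(a.toNat : Int), (b.toNat : Int)] :: pvAltGo rest

def text_to_int_py_alt (txt : String) : List (List Int) :=
  pvAltGo txt.toList

-- ===== PRECONDITION & SPEC =====
def Spec_text_to_int_py (txt : String) (out : List (List Int)) : Prop := out = text_to_int_py_alt txt
instance (txt : String) (out : List (List Int)) : Decidable (Spec_text_to_int_py txt out) := by unfold Spec_text_to_int_py; infer_instance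

-- ===== CLAIM (what is proved, stated in full; the proofs are below) =====
def Claim_equal_text_to_int_py : Prop := ∀ (txt : String), Dom_text_to_int_py txt → Spec_text_to_int_py txt (text_to_int_py txt)

-- ===== LEMMAS AND PROOFS =====

-- closed form of A's fold: state after n steps starting at (acc, k)
theorem pvFoldA_closed (cs : List Char) (n : Nat) (acc : List (List Int)) (k : Int) :
    (PySem.List.pyRange 0 (n : Int) 1).foldl
      (fun (st : List (List Int) × Int) _i =>
        (st.1 ++ [(PySem.List.slice cs (some st.2) (some (st.2 + 2))).map (fun c => (c.toNat : Int))],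
         st.2 + 2))
      (acc, k)
    = (acc ++ (List.range n).map (fun (i : Nat) =>
        (PySem.List.slice cs (some (k + 2 * (i : Int))) (some (k + 2 * (i : Int) + 2))).map
          (fun c => (c.toNat : Int))),
       k + 2 * n) := by
  induction n generalizing acc k with
  | zero => simp [PySem.List.pyRange_one_eq_nil]
  | succ n ih =>
      rw [show ((n + 1 : Nat) : Int) = (n : Int) + 1 by push_cast; ring,
          PySem.List.pyRange_one_succ_right (by positivity),
          List.foldl_append, ih]
      simp [List.range_succ, List.map_append, List.append_assoc]
      ring

-- slices reduced to drop/take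
theorem pvSliceForm (cs : List Char) (n : Nat) :
    (List.range n).map (fun (i : Nat) =>
        (PySem.List.slice cs (some ((0 : Int) + 2 * (i : Int))) (some ((0 : Int) + 2 * (i : Int) + 2))).map
          (fun c => (c.toNat : Int)))
    = (List.range n).map (fun (i : Nat) => ((cs.drop (2 * i)).take 2).map (fun c => (c.toNat : Int))) := by
  refine List.map_congr_left (fun i _ => ?_)
  rw [PySem.List.slice_toNat cs (by positivity) (by positivity)]
  norm_num
  congr 1
  omega

-- the closed form of A equals B's recursion
theorem pvClosed (cs : List Char) :
    (if cs.length % 2 = 1 then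
      (List.range (cs.length / 2)).map (fun (i : Nat) => ((cs.drop (2 * i)).take 2).map (fun c => (c.toNat : Int)))
        ++ [[(cs.map (fun c => (c.toNat : Int))).getD (cs.length - 1) 0, 0]]
     else
      (List.range (cs.length / 2)).map (fun (i : Nat) => ((cs.drop (2 * i)).take 2).map (fun c => (c.toNat : Int))))
    = pvAltGo cs := by
  induction cs using pvAltGo.induct with
  | case1 => simp [pvAltGo]
  | case2 a => simp [pvAltGo]
  | case3 a b rest ihr =>
    simp only [pvAltGo, List.length_cons]
    have hd2 : (rest.length + 1 + 1) / 2 = rest.length / 2 + 1 := by omega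
    have hm2 : (rest.length + 1 + 1) % 2 = rest.length % 2 := by omega
    rw [hd2, hm2]
    have hpair : (List.range (rest.length / 2 + 1)).map
        (fun (i : Nat) => (((a :: b :: rest).drop (2 * i)).take 2).map (fun c => (c.toNat : Int)))
        = [(a.toNat : Int), (b.toNat : Int)] :: (List.range (rest.length / 2)).map
            (fun (i : Nat) => ((rest.drop (2 * i)).take 2).map (fun c => (c.toNat : Int))) := by
      rw [List.range_succ_eq_map, List.map_cons, List.map_map]
      refine List.cons_eq_cons.mpr ⟨by simp, List.map_congr_left fun i _ => ?_⟩
      simp only [Function.comp_apply, Nat.succ_eq_add_one]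
      rw [show 2 * (i + 1) = 2 * i + 1 + 1 by ring]
      simp
    rw [hpair]
    by_cases hodd : rest.length % 2 = 1
    · rw [if_pos hodd]
      rw [if_pos hodd] at ihr
      have hlast : ((a :: b :: rest).map (fun c => (c.toNat : Int))).getD (rest.length + 1 + 1 - 1) 0
          = (rest.map (fun c => (c.toNat : Int))).getD (rest.length - 1) 0 := by
        rw [show rest.length + 1 + 1 - 1 = rest.length - 1 + 1 + 1 by omega]
        simp
      rw [hlast, List.cons_append, ihr]
    · rw [if_neg hodd]
      rw [if_neg hodd] at ihr
      rw [ihr]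

theorem pvMain (txt : String) : text_to_int_py txt = pvAltGo txt.toList := by
  unfold text_to_int_py
  simp only [PySem.Str.len_eq]
  generalize txt.toList = cs
  have htd : PySem.Int.truncdiv ((cs.length : Int)) 2 = ((cs.length / 2 : Nat) : Int) := by
    simp [PySem.Int.truncdiv]
  have hmod : PySem.Int.mod ((cs.length : Int)) 2 = ((cs.length % 2 : Nat) : Int) := by
    exact_mod_cast PySem.Int.mod_natCast cs.length 2
  rw [htd, hmod, pvFoldA_closed cs (cs.length / 2) [] 0]
  have hget : PySem.List.pyGetD (cs.map (fun c => (c.toNat : Int))) ((cs.length : Int) - 1) 0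
      = (cs.map (fun c => (c.toNat : Int))).getD (cs.length - 1) 0 := by
    by_cases h0 : cs.length = 0
    · simp [h0, PySem.List.pyGetD, PySem.List.pyGet?, PySem.List.pyIdx?]
    · rw [show ((cs.length : Int) - 1) = ((cs.length - 1 : Nat) : Int) by omega]
      simp [pysem]
  simp only [hget]
  rw [← pvClosed cs, pvSliceForm]
  split_ifs with h1 h2 h2 <;> first | rfl | (exfalso; omega)

-- ===== VERDICT (by name: the statement is the Claim_ definition above) =====
theorem text_to_int_py_spec : Claim_equal_text_to_int_py := by
  intro txt _
  unfold Spec_text_to_int_py text_to_int_py_alt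
  exact pvMain txt
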